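-- pv_equiv track=rewrite | github.com/sail-mskcc/pyfacl | pyfacl/pyfacl.py | _permission_match
-- ===== SOURCE A (Python) =====
-- def _permission_match(perm_key: str, perm_query: str, mode: str) -> bool:
--     """
--     Check if the permission key matches the permission query for three different
--     modes:
--
--     Example: rwx vs rx
--     - 'exact': both must match exactly
--     - 'at_least': perm_key must have at least the permissions in perm_query
--     - 'at_most': perm_key must have at most the permissions in perm_query
--
--     Args:
--         perm_key (str): The permission key (e.g., 'rwx').
--         perm_query (str): The permission query (e.g., 'rx').
--         mode (str): The matching mode ('exact', 'at_least', 'at_most').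
--     """
--     if mode == "exact":
--         return perm_key == perm_query
--     elif mode == "at_least":
--         for char_query in perm_query:
--             if char_query != "-" and char_query not in perm_key:
--                 return False
--         return True
--     elif mode == "at_most":
--         for char_key in perm_key:
--             if char_key != "-" and char_key not in perm_query:
--                 return False
--         return True
--     else:
--         raise ValueError(
--             f"Invalid mode '{mode}'. Choose from 'exact', 'at_least', 'at_most'."
--         )
-- ===== SOURCE B (Python) =====
-- def _mask(s: str) -> int:
--     """Bitset of the characters of s, one bit per code point; '-' is ignored."""
--     m = 0
--     for ch in s:
--         if ch != "-":
--             m |= 1 << ord(ch)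
--     return m
--
--
-- def _permission_match(perm_key: str, perm_query: str, mode: str) -> bool:
--     if mode == "exact":
--         return perm_key == perm_query
--     elif mode == "at_least":
--         km, qm = _mask(perm_key), _mask(perm_query)
--         return qm | km == km
--     elif mode == "at_most":
--         km, qm = _mask(perm_key), _mask(perm_query)
--         return km | qm == qm
--     else:
--         raise ValueError(
--             f"Invalid mode '{mode}'. Choose from 'exact', 'at_least', 'at_most'."
--         )
-- ===== Notes on version B (the rewrite author's own statement) =====
-- stated objective: alternative
-- what changed: Replaces A's per-character membership-scanning loops with an integer bitset encoding: each string is folded once into a bitmask (skipping '-'), and each comparison mode is decided by one bitwise identity q|k==k.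
import Mathlib
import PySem

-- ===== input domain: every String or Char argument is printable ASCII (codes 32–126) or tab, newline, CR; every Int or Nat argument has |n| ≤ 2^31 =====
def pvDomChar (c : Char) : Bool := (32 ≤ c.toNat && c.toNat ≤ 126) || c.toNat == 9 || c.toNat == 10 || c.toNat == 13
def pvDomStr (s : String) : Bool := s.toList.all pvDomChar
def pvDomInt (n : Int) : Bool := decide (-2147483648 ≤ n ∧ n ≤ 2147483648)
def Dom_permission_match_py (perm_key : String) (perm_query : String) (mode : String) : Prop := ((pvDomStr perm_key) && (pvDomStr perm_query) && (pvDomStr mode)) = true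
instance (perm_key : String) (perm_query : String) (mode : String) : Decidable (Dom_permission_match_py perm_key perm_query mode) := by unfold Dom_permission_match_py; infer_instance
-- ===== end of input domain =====

-- B replaces A's character-scanning loops by a one-pass integer-bitset encoding of each
-- string ('-' skipped) and decides each comparison mode by a single bitwise test q|k==k
-- (objective: alternative).


-- ===== PORT A =====
-- 'for c in src: if c != "-" and c not in dst: return False / return True' (both branches of A)
def pvScanA (dst : List Char) : List Char → Bool
  | [] => true
  | c :: rest => if c != '-' && !(dst.contains c) then false else pvScanA dst rest

def permission_match_py (perm_key : String) (perm_query : String) (mode : String) : Bool :=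
  if mode == "exact" then perm_key == perm_query
  else if mode == "at_least" then pvScanA perm_key.toList perm_query.toList
  else if mode == "at_most" then pvScanA perm_query.toList perm_key.toList
  else false  -- Python raises ValueError here; excluded by Pre_

-- ===== PORT B =====
-- _mask: 'm = 0; for ch in s: if ch != "-": m |= 1 << ord(ch); return m'
def pvMask : List Char → Nat → Nat
  | [], m => m
  | c :: rest, m => pvMask rest (if c ≠ '-' then m ||| (1 <<< c.toNat) else m)

def permission_match_py_alt (perm_key : String) (perm_query : String) (mode : String) : Bool :=
  if mode == "exact" then perm_key == perm_query
  else if mode == "at_least" then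
    let km := pvMask perm_key.toList 0
    let qm := pvMask perm_query.toList 0
    qm ||| km == km
  else if mode == "at_most" then
    let km := pvMask perm_key.toList 0
    let qm := pvMask perm_query.toList 0
    km ||| qm == qm
  else false  -- Python B raises ValueError here; excluded by Pre_

-- ===== PRECONDITION & SPEC =====
-- A raises ValueError on any mode other than these three; exactly those inputs are excluded.
def Pre_permission_match_py (_perm_key : String) (_perm_query : String) (mode : String) : Prop :=
  mode = "exact" ∨ mode = "at_least" ∨ mode = "at_most"
instance (perm_key : String) (perm_query : String) (mode : String) : Decidable (Pre_permission_match_py perm_key perm_query mode) := by unfold Pre_permission_match_py; infer_instance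

def pvWitness_permission_match_py : String × String × String := ("rwx", "rx", "at_least")

def Spec_permission_match_py (perm_key : String) (perm_query : String) (mode : String) (out : Bool) : Prop := out = permission_match_py_alt perm_key perm_query mode
instance (perm_key : String) (perm_query : String) (mode : String) (out : Bool) : Decidable (Spec_permission_match_py perm_key perm_query mode out) := by unfold Spec_permission_match_py; infer_instance

-- ===== CLAIM (what is proved, stated in full; the proofs are below) =====
def Claim_equal_permission_match_py : Prop := ∀ (perm_key : String) (perm_query : String) (mode : String), Dom_permission_match_py perm_key perm_query mode → Pre_permission_match_py perm_key perm_query mode → Spec_permission_match_py perm_key perm_query mode (permission_match_py perm_key perm_query mode)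

-- ===== LEMMAS AND PROOFS =====

-- A's scan returns true iff every non-'-' character of src occurs in dst.
theorem pvScanA_eq_true_iff (dst src : List Char) :
    pvScanA dst src = true ↔ ∀ c ∈ src, c = '-' ∨ c ∈ dst := by
  induction src with
  | nil => simp [pvScanA]
  | cons c rest ih =>
    simp only [pvScanA, List.mem_cons]
    by_cases h : c = '-'
    · simp [h, ih]
    · by_cases hm : c ∈ dst
      · simp [h, hm, ih]
      · simp [h, hm]

-- bit n of the mask of l (over accumulator m) is set iff it was set in m or some
-- non-'-' character of l has code n.
theorem pvMask_testBit (l : List Char) (m n : Nat) :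
    (pvMask l m).testBit n = true ↔
      (m.testBit n = true ∨ ∃ c ∈ l, c ≠ '-' ∧ c.toNat = n) := by
  induction l generalizing m with
  | nil => simp [pvMask]
  | cons c rest ih =>
    simp only [pvMask, List.mem_cons]
    by_cases h : c = '-'
    · simp only [h]
      rw [ih]
      constructor
      · rintro (hm | hc)
        · exact Or.inl hm
        · exact Or.inr ⟨hc.choose, Or.inr hc.choose_spec.1, hc.choose_spec.2⟩
      · rintro (hm | ⟨d, hd, hne, hn⟩)
        · exact Or.inl hm
        · rcases hd with rfl | hd
          · exact absurd rfl hne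
          · exact Or.inr ⟨d, hd, hne, hn⟩
    · simp only [if_pos (by exact h)]
      rw [ih, Nat.testBit_or]
      have hbit : (1 <<< c.toNat).testBit n = decide (c.toNat = n) := by
        rw [Nat.shiftLeft_eq, one_mul, Nat.testBit_two_pow]
      rw [hbit]
      constructor
      · rintro (hor | hc)
        · rcases Bool.or_eq_true_iff.mp hor with hm | hcn
          · exact Or.inl hm
          · exact Or.inr ⟨c, Or.inl rfl, h, of_decide_eq_true hcn⟩
        · obtain ⟨d, hd, hne, hn⟩ := hc
          exact Or.inr ⟨d, Or.inr hd, hne, hn⟩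
      · rintro (hm | ⟨d, hd, hne, hn⟩)
        · exact Or.inl (Bool.or_eq_true_iff.mpr (Or.inl hm))
        · rcases hd with rfl | hd
          · exact Or.inl (Bool.or_eq_true_iff.mpr (Or.inr (decide_eq_true hn)))
          · exact Or.inr ⟨d, hd, hne, hn⟩

theorem char_toNat_inj {c d : Char} (h : c.toNat = d.toNat) : c = d := by
  apply Char.ext
  exact UInt32.toNat_inj.mp h

-- B's bitwise subset identity computes the same truth value as A's scan.
theorem pvScan_eq_mask (dst src : List Char) :
    pvScanA dst src = (pvMask src 0 ||| pvMask dst 0 == pvMask dst 0) := by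
  have hsub : (pvMask src 0 ||| pvMask dst 0 = pvMask dst 0) ↔
      (∀ n, (pvMask src 0).testBit n = true → (pvMask dst 0).testBit n = true) := by
    constructor
    · intro heq n hq
      have := congrArg (fun x => x.testBit n) heq
      simp only [Nat.testBit_or, hq, Bool.true_or] at this
      exact this.symm
    · intro h
      apply Nat.eq_of_testBit_eq
      intro n
      rw [Nat.testBit_or]
      by_cases hq : (pvMask src 0).testBit n = true
      · simp [hq, h n hq]
      · simp [hq]
  by_cases h : pvScanA dst src = true
  · rw [h]
    symm
    rw [beq_iff_eq, hsub]
    intro n hq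
    rcases (pvMask_testBit src 0 n).mp hq with hm | ⟨c, hc, hne, hn⟩
    · simp [Nat.zero_testBit] at hm
    · rcases (pvScanA_eq_true_iff dst src).mp h c hc with rfl | hmem
      · exact absurd rfl hne
      · exact (pvMask_testBit dst 0 n).mpr (Or.inr ⟨c, hmem, hne, hn⟩)
  · rw [Bool.not_eq_true] at h
    rw [h]
    symm
    rw [Bool.eq_false_iff]
    intro hc
    apply absurd _ (h ▸ Bool.false_ne_true)
    rw [pvScanA_eq_true_iff]
    intro c hcmem
    by_cases hdash : c = '-'
    · exact Or.inl hdash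
    · right
      have hq : (pvMask src 0).testBit c.toNat = true :=
        (pvMask_testBit src 0 c.toNat).mpr (Or.inr ⟨c, hcmem, hdash, rfl⟩)
      have hk := (hsub.mp (beq_iff_eq.mp hc)) c.toNat hq
      rcases (pvMask_testBit dst 0 c.toNat).mp hk with hm | ⟨d, hd, _, hn⟩
      · simp [Nat.zero_testBit] at hm
      · exact char_toNat_inj hn.symm ▸ hd

-- ===== VERDICT (by name: the statement is the Claim_ definition above) =====
theorem permission_match_py_spec : Claim_equal_permission_match_py := by
  intro perm_key perm_query mode _ hpre
  unfold Spec_permission_match_py permission_match_py permission_match_py_alt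
  rcases hpre with h | h | h <;> simp [h, pvScan_eq_mask]
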